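-- pv_equiv track=rewrite | github.com/MatthewDaws/Cryptology2812 | ma2812/primes.py | _factor_step_one
-- ===== SOURCE A (Python) =====
-- def _factor_step_one(n):
--     """Extract -1 and 2 factors, returns (partial_factors_list, current_n)"""
--     n = int(n)
--     factors = []
--     if n < 0:
--         factors.append(-1)
--         n = -n
--     while n%2 == 0 and n > 1:
--         factors.append(2)
--         n = n // 2
--     return factors, n
-- ===== SOURCE B (Python) =====
-- def _factor_step_one(n):
--     """Extract -1 and 2 factors, returns (partial_factors_list, current_n)"""
--     n = int(n)
--     factors = []
--     if n < 0:
--         factors.append(-1)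
--         n = -n
--     if n == 0:
--         return factors, 0
--     count = (n & -n).bit_length() - 1
--     factors.extend([2] * count)
--     return factors, n >> count
-- ===== Notes on version B (the rewrite author's own statement) =====
-- stated objective: alternative
-- what changed: Replaces the repeated-halving while loop with a closed-form trailing-zero count ((n & -n).bit_length() - 1), bulk construction of the list of 2s, and a single shift for the odd part.
import Mathlib
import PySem

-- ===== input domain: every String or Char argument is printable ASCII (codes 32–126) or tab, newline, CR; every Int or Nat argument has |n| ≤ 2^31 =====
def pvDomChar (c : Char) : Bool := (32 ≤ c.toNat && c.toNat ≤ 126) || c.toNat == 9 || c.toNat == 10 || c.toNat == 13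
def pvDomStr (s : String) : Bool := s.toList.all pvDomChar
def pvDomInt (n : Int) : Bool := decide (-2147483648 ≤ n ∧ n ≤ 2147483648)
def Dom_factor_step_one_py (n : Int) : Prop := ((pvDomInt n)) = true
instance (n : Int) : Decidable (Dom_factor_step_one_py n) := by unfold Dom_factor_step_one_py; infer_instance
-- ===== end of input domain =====

-- B replaces A's repeated-halving loop with a closed-form trailing-zero count (n & -n).bit_length()-1,
-- bulk construction of the 2s and a single shift for the odd part (objective: alternative, loop-free).


-- ===== PORT A =====
-- the 'while n%2 == 0 and n > 1' loop of A, carrying the factors accumulator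
def factorLoopA (n : Int) (factors : List Int) : List Int × Int :=
  if h : PySem.Int.mod n 2 = 0 ∧ n > 1 then
    factorLoopA (PySem.Int.floordiv n 2) (factors ++ [2])
  else
    (factors, n)
termination_by n.toNat
decreasing_by
  have h2 : PySem.Int.floordiv n 2 = n / 2 := PySem.Int.floordiv_eq_ediv_of_pos (by omega)
  rw [h2]; omega

def factor_step_one_py (n : Int) : List Int × Int :=
  let factors : List Int := []
  if n < 0 then factorLoopA (-n) (factors ++ [-1]) else factorLoopA n factors

-- ===== PORT B =====
def factor_step_one_py_alt (n : Int) : List Int × Int :=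
  let p : List Int × Int := if n < 0 then ([-1], -n) else ([], n)
  let factors := p.1
  let m := p.2
  if m = 0 then (factors, 0)
  else
    let count : Nat := PySem.Int.bitLength (PySem.Int.band m (-m)) - 1
    (factors ++ List.replicate count 2, m >>> count)

-- ===== PRECONDITION & SPEC =====
def Spec_factor_step_one_py (n : Int) (out : List Int × Int) : Prop := out = factor_step_one_py_alt n
instance (n : Int) (out : List Int × Int) : Decidable (Spec_factor_step_one_py n out) := by unfold Spec_factor_step_one_py; infer_instance

-- ===== CLAIM (what is proved, stated in full; the proofs are below) =====
def Claim_equal_factor_step_one_py : Prop := ∀ (n : Int), Dom_factor_step_one_py n → Spec_factor_step_one_py n (factor_step_one_py n)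

-- ===== LEMMAS AND PROOFS =====

theorem shift_succ (n : Int) (k : Nat) : n >>> (k+1) = (n/2) >>> k := by
  simp only [Int.shiftRight_eq_div_pow, pow_succ]
  push_cast
  rw [mul_comm, ← Int.ediv_ediv_of_nonneg (by norm_num : (0:Int) ≤ 2)]

-- pvLow m = m - (m &&& (m-1)) is the lowest set bit of m (the value Python's n & -n computes for n = m > 0)
def pvLow (m : Nat) : Nat := m - (m &&& (m - 1))

theorem pvLow_odd (m : Nat) (h : m % 2 = 1) : pvLow m = 1 := by
  unfold pvLow
  have hand : m &&& (m - 1) = m - 1 := by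
    apply Nat.eq_of_testBit_eq
    intro i
    rw [Nat.testBit_and]
    cases i with
    | zero => simp [Nat.testBit_zero]; omega
    | succ j =>
      rw [Nat.testBit_succ, Nat.testBit_succ]
      have : m / 2 = (m - 1) / 2 := by omega
      rw [this, Bool.and_self]
  omega

theorem pvLow_even (m : Nat) (h : m % 2 = 0) (h0 : 0 < m) : pvLow m = 2 * pvLow (m / 2) := by
  unfold pvLow
  have hand : m &&& (m - 1) = 2 * (m / 2 &&& (m / 2 - 1)) := by
    apply Nat.eq_of_testBit_eq
    intro i
    rw [Nat.testBit_and]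
    cases i with
    | zero =>
      simp [Nat.testBit_zero]
      omega
    | succ j =>
      simp only [Nat.testBit_succ]
      have h1 : (m - 1) / 2 = m / 2 - 1 := by omega
      have h2 : 2 * (m / 2 &&& (m / 2 - 1)) / 2 = m / 2 &&& (m / 2 - 1) := by omega
      rw [h1, h2, Nat.testBit_and]
  have hle : m / 2 &&& (m / 2 - 1) ≤ m / 2 := Nat.and_le_left
  omega

theorem pvLow_pos (m : Nat) (h0 : 0 < m) : 0 < pvLow m := by
  unfold pvLow
  have : m &&& (m - 1) ≤ m - 1 := Nat.and_le_right
  omega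

theorem band_neg_eq_pvLow (m : Nat) (h0 : 0 < m) :
    PySem.Int.band (m : Int) (-(m : Int)) = (pvLow m : Int) := by
  rw [PySem.Int.band]
  rw [if_pos (by positivity), if_neg (by omega)]
  unfold pvLow
  congr 1
  have h1 : (-(-(m:Int)) - 1).toNat = m - 1 := by omega
  have h2 : ((m:Int)).toNat = m := by omega
  rw [h1, h2]

theorem bitLength_one : PySem.Int.bitLength ((1:Nat) : Int) = 1 := by decide

theorem bitLength_double (x : Nat) (hx : 0 < x) :
    PySem.Int.bitLength ((2 * x : Nat) : Int) = PySem.Int.bitLength ((x : Nat) : Int) + 1 := by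
  have := PySem.Int.bitLength_natCast (m := 2 * x) (by omega)
  rw [this]
  congr 2
  omega

theorem bitLength_pos (x : Nat) (hx : 0 < x) : 0 < PySem.Int.bitLength ((x : Nat) : Int) := by
  rw [PySem.Int.bitLength_natCast (m := x) hx]; omega

-- A's loop on a positive input appends one 2 per trailing zero bit and returns the odd part:
-- exactly B's closed form, with bitLength(lowest set bit) - 1 trailing zeros
theorem factorLoopA_eq : ∀ (m : Nat), 0 < m → ∀ f : List Int,
    factorLoopA (m : Int) f =
      (f ++ List.replicate (PySem.Int.bitLength ((pvLow m : Nat) : Int) - 1) 2,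
       (m : Int) >>> (PySem.Int.bitLength ((pvLow m : Nat) : Int) - 1)) := by
  intro m
  induction m using Nat.strong_induction_on with
  | _ m ih =>
    intro h0 f
    have hm : PySem.Int.mod (m : Int) 2 = (m : Int) % 2 := PySem.Int.mod_eq_emod_of_pos (by norm_num)
    have hd : PySem.Int.floordiv (m : Int) 2 = (m : Int) / 2 := PySem.Int.floordiv_eq_ediv_of_pos (by norm_num)
    rw [factorLoopA]
    by_cases he : m % 2 = 0 ∧ 1 < m
    · rw [dif_pos (by exact ⟨by rw [hm]; omega, by omega⟩)]
      rw [hd]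
      have hcast : (m : Int) / 2 = ((m / 2 : Nat) : Int) := by omega
      rw [hcast, ih (m / 2) (by omega) (by omega) (f ++ [2])]
      have hlow : pvLow m = 2 * pvLow (m / 2) := pvLow_even m he.1 h0
      have hpos : 0 < pvLow (m / 2) := pvLow_pos _ (by omega)
      have hbl : PySem.Int.bitLength ((pvLow m : Nat) : Int)
          = PySem.Int.bitLength ((pvLow (m / 2) : Nat) : Int) + 1 := by
        rw [hlow]; exact bitLength_double _ hpos
      have hblpos : 0 < PySem.Int.bitLength ((pvLow (m / 2) : Nat) : Int) := bitLength_pos _ hpos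
      rw [hbl]
      rw [show PySem.Int.bitLength ((pvLow (m/2) : Nat) : Int) + 1 - 1
            = (PySem.Int.bitLength ((pvLow (m/2) : Nat) : Int) - 1) + 1 from by omega]
      rw [List.replicate_succ, shift_succ, hcast]
      simp
    · rw [dif_neg (by rw [hm]; omega)]
      have hodd : m % 2 = 1 := by omega
      rw [pvLow_odd m hodd, bitLength_one]
      simp

theorem factor_step_main (n : Int) : factor_step_one_py n = factor_step_one_py_alt n := by
  rcases lt_trichotomy n 0 with hn | hn | hn
  · have hm : ((-n).toNat : Int) = -n := by omega
    rw [factor_step_one_py, factor_step_one_py_alt]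
    simp only [if_pos hn]
    rw [if_neg (by omega : ¬ (-n = 0))]
    have h0 : 0 < (-n).toNat := by omega
    have := factorLoopA_eq (-n).toNat h0 ([] ++ [-1])
    rw [hm] at this
    rw [this]
    rw [show -n = (((-n).toNat : Nat) : Int) from hm.symm, band_neg_eq_pvLow _ h0, hm]
    simp
  · subst hn
    rw [factor_step_one_py, factor_step_one_py_alt]
    norm_num
    rw [factorLoopA, dif_neg (by rintro ⟨-, h⟩; omega)]
  · rw [factor_step_one_py, factor_step_one_py_alt]
    rw [if_neg (by omega : ¬ n < 0), if_neg (by omega : ¬ n < 0), if_neg (by omega : ¬ n = 0)]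
    have hm : (n.toNat : Int) = n := by omega
    have h0 : 0 < n.toNat := by omega
    have := factorLoopA_eq n.toNat h0 []
    rw [hm] at this
    rw [this]
    rw [show n = ((n.toNat : Nat) : Int) from hm.symm, band_neg_eq_pvLow _ h0, hm]

-- ===== VERDICT (by name: the statement is the Claim_ definition above) =====
theorem factor_step_one_py_spec : Claim_equal_factor_step_one_py := by
  intro n _
  unfold Spec_factor_step_one_py
  exact factor_step_main n
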